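-- pv_equiv track=rewrite | github.com/Kenan3477/Sales-Form | research_system.py | _group_related_facts
-- ===== SOURCE A (Python) =====
-- from typing import Any, Dict, List, Optional, Set, Tuple, Union
--
-- def _group_related_facts(facts: List[str]) -> List[List[str]]:
--     """Group related facts together"""
--     if not facts:
--         return []
--
--     # Simple grouping based on common words/concepts
--     groups = []
--     used_facts = set()
--
--     for i, fact in enumerate(facts):
--         if i in used_facts:
--             continue
--
--         group = [fact]
--         used_facts.add(i)
--
--         # Find related facts
--         fact_words = set(fact.lower().split())
--
--         for j, other_fact in enumerate(facts[i+1:], i+1):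
--             if j in used_facts:
--                 continue
--
--             other_words = set(other_fact.lower().split())
--             overlap = len(fact_words.intersection(other_words))
--
--             # If significant word overlap, group together
--             if overlap >= 2:
--                 group.append(other_fact)
--                 used_facts.add(j)
--
--         if len(group) >= 1:  # Keep all groups, even single facts
--             groups.append(group)
--
--     return groups
-- ===== SOURCE B (Python) =====
-- from typing import List
--
-- def _group_related_facts(facts: List[str]) -> List[List[str]]:
--     """Group related facts together (leader/partition formulation, word sets computed once)."""
--     pending = [(f, set(f.lower().split())) for f in facts]
--     groups = []
--     while pending:
--         lead, lead_words = pending[0]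
--         rest = pending[1:]
--         related = [f for f, ws in rest if len(lead_words & ws) >= 2]
--         pending = [(f, ws) for f, ws in rest if len(lead_words & ws) < 2]
--         groups.append([lead] + related)
--     return groups
-- ===== Notes on version B (the rewrite author's own statement) =====
-- stated objective: faster
-- what changed: Replaces A's index-based double loop with a used-index set by a leader/partition worklist over (fact, word-set) pairs: each fact is lowered and split exactly once up front, and grouped facts are removed from the worklist instead of being tracked and re-skipped by index.
import Mathlib
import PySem

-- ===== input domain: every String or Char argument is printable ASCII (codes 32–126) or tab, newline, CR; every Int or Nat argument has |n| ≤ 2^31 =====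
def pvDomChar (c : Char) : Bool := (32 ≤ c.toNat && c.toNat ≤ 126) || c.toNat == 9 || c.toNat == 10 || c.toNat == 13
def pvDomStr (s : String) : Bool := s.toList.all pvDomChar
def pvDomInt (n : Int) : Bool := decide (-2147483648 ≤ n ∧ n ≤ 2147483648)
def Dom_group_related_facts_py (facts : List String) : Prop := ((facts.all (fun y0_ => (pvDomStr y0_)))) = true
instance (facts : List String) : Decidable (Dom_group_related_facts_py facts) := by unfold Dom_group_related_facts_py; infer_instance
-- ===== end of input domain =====

-- B re-implements A's greedy grouping as a leader/partition worklist that lowers+splits each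
-- fact once (instead of once per surviving pair) and needs no index bookkeeping.

-- ===== PORT A =====
-- set(fact.lower().split())
def pvWords (s : String) : PySem.Set String :=
  PySem.Set.ofList (PySem.Str.split₀ (PySem.Str.lower s))

-- body of A's inner 'for j, other_fact in enumerate(facts[i+1:], i+1)' loop
def pvStepInner (fw : PySem.Set String) (st2 : List String × PySem.Set Int)
    (q : Int × String) : List String × PySem.Set Int :=
  if q.1 ∈ st2.2 then st2
  else if PySem.Set.len (PySem.Set.inter fw (pvWords q.2)) ≥ 2 then
    (st2.1 ++ [q.2], PySem.Set.add st2.2 q.1)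
  else st2

-- body of A's outer 'for i, fact in enumerate(facts)' loop (state = (groups, used_facts))
def pvStepOuter (facts : List String) (st : List (List String) × PySem.Set Int)
    (p : Int × String) : List (List String) × PySem.Set Int :=
  if p.1 ∈ st.2 then st
  else
    let used := PySem.Set.add st.2 p.1
    let fw := pvWords p.2
    let inner :=
      (PySem.List.enumerate (PySem.List.slice facts (some (p.1 + 1)) none) (p.1 + 1)).foldl
        (pvStepInner fw) ([p.2], used)
    if inner.1.length ≥ 1 then (st.1 ++ [inner.1], inner.2) else (st.1, inner.2)

def group_related_facts_py (facts : List String) : List (List String) :=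
  if facts = [] then []
  else ((PySem.List.enumerate facts 0).foldl (pvStepOuter facts) ([], PySem.Set.empty)).1

-- ===== PORT B =====
-- B's worklist loop: take the leader, partition the rest by ≥2-word overlap, recurse on the rest
def pvBuild : List (String × PySem.Set String) → List (List String)
  | [] => []
  | p :: rest =>
    ([p.1] ++ (rest.filter (fun q => decide (2 ≤ PySem.Set.len (PySem.Set.inter p.2 q.2)))).map Prod.fst)
      :: pvBuild (rest.filter (fun q => decide (PySem.Set.len (PySem.Set.inter p.2 q.2) < 2)))
termination_by l => l.length
decreasing_by
  simp only [List.length_cons, List.length_unattach]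
  exact Nat.lt_succ_of_le ((List.length_filter_le _ _).trans (by simp))

def group_related_facts_py_alt (facts : List String) : List (List String) :=
  pvBuild (facts.map (fun f => (f, pvWords f)))

-- ===== PRECONDITION & SPEC =====
def Spec_group_related_facts_py (facts : List String) (out : List (List String)) : Prop := out = group_related_facts_py_alt facts
instance (facts : List String) (out : List (List String)) : Decidable (Spec_group_related_facts_py facts out) := by unfold Spec_group_related_facts_py; infer_instance

-- ===== CLAIM (what is proved, stated in full; the proofs are below) =====
def Claim_equal_group_related_facts_py : Prop := ∀ (facts : List String), Dom_group_related_facts_py facts → Spec_group_related_facts_py facts (group_related_facts_py facts)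

-- ===== LEMMAS AND PROOFS =====

-- the condition under which A's inner loop picks q (relative to the used-set u)
def pvP (fw : PySem.Set String) (u : List Int) (q : Int × String) : Bool :=
  !(decide (q.1 ∈ u)) && decide (2 ≤ PySem.Set.len (PySem.Set.inter fw (pvWords q.2)))

-- pairing used by B
def pvPair (p : Int × String) : String × PySem.Set String := (p.2, pvWords p.2)

lemma pvBuild_cons (p : String × PySem.Set String) (rest : List (String × PySem.Set String)) :
    pvBuild (p :: rest)
      = ([p.1] ++ (rest.filter (fun q => decide (2 ≤ PySem.Set.len (PySem.Set.inter p.2 q.2)))).map Prod.fst)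
        :: pvBuild (rest.filter (fun q => decide (PySem.Set.len (PySem.Set.inter p.2 q.2) < 2))) := by
  rw [pvBuild]

lemma pv_mem_map_fst_filter {L : List (Int × String)} (hnd : (L.map Prod.fst).Nodup)
    {p : Int × String} (hp : p ∈ L) (Q : Int × String → Bool) :
    p.1 ∈ (L.filter Q).map Prod.fst ↔ Q p = true := by
  constructor
  · intro h
    obtain ⟨q, hqf, hfst⟩ := List.mem_map.mp h
    have hqL := List.mem_of_mem_filter hqf
    have hqp : q = p := List.inj_on_of_nodup_map hnd hqL hp hfst
    exact hqp ▸ (List.mem_filter.mp hqf).2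
  · intro hQ
    exact List.mem_map.mpr ⟨p, List.mem_filter.mpr ⟨hp, hQ⟩, rfl⟩

-- A's inner loop = one filter pass (indices distinct ⇒ the growing used-set never re-fires)
lemma pv_inner_fold (fw : PySem.Set String) (L : List (Int × String)) :
    ∀ (g : List String) (u : List Int), (L.map Prod.fst).Nodup →
    L.foldl (pvStepInner fw) (g, u)
      = (g ++ (L.filter (pvP fw u)).map Prod.snd, u ++ (L.filter (pvP fw u)).map Prod.fst) := by
  induction L with
  | nil => intro g u _; simp
  | cons q L' ih =>
    intro g u hnd
    have hnd' : (L'.map Prod.fst).Nodup := (List.nodup_cons.mp (by simpa using hnd)).2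
    have hqL' : q.1 ∉ L'.map Prod.fst := (List.nodup_cons.mp (by simpa using hnd)).1
    by_cases hq : q.1 ∈ u
    · have hP : pvP fw u q = false := by simp [pvP, hq]
      simp only [List.foldl_cons, pvStepInner, if_pos hq, List.filter_cons, hP]
      simpa using ih g u hnd'
    · by_cases hov : 2 ≤ PySem.Set.len (PySem.Set.inter fw (pvWords q.2))
      · have hovn : 2 ≤ (PySem.Set.inter fw (pvWords q.2)).length := by
          simpa [PySem.Set.len] using hov
        have hP : pvP fw u q = true := by simp [pvP, hq, hovn]
        have hadd : PySem.Set.add u q.1 = u ++ [q.1] := PySem.Set.add_of_not_mem hq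
        simp only [List.foldl_cons, pvStepInner, if_neg hq, if_pos (by exact hov),
          List.filter_cons, hP, hadd]
        rw [ih (g ++ [q.2]) (u ++ [q.1]) hnd']
        have hfc : L'.filter (pvP fw (u ++ [q.1])) = L'.filter (pvP fw u) := by
          apply List.filter_congr
          intro x hx
          have hxq : x.1 ≠ q.1 := by
            intro h
            exact hqL' (h ▸ List.mem_map.mpr ⟨x, hx, rfl⟩)
          simp [pvP, List.mem_append, hxq]
        rw [hfc]
        simp
      · have hovn : (PySem.Set.inter fw (pvWords q.2)).length ≤ 1 := by
          simp [PySem.Set.len] at hov; omega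
        have hP : pvP fw u q = false := by simp [pvP, hovn]
        simp only [List.foldl_cons, pvStepInner, if_neg hq, if_neg hov, List.filter_cons, hP]
        simpa using ih g u hnd'

lemma pv_nodup_fst_enumerate (xs : List String) (s : Int) :
    ((PySem.List.enumerate xs s).map Prod.fst).Nodup := by
  rw [PySem.List.map_fst_enumerate]
  exact PySem.List.nodup_pyRange_one _ _

-- A's outer loop from position k = B's recursion on the not-yet-used suffix
set_option maxHeartbeats 1000000 in
lemma pv_outer_fold (facts : List String) (l : List String) :
    ∀ (k : Int) (used : List Int) (groups : List (List String)),
    0 ≤ k → facts.drop k.toNat = l →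
    ((PySem.List.enumerate l k).foldl (pvStepOuter facts) (groups, used)).1
      = groups ++ pvBuild (((PySem.List.enumerate l k).filter
          (fun p => !(decide (p.1 ∈ used)))).map pvPair) := by
  induction l with
  | nil => intro k used groups _ _; simp [pvBuild]
  | cons x l' ih =>
    intro k used groups hk hdrop
    have hdrop' : facts.drop (k + 1).toNat = l' := by
      have h1 : (k + 1).toNat = k.toNat + 1 := by omega
      rw [h1, ← List.drop_drop, hdrop]
      simp
    rw [PySem.List.enumerate_cons, List.foldl_cons]
    by_cases hkused : k ∈ used
    · have hstep : pvStepOuter facts (groups, used) (k, x) = (groups, used) := by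
        simp [pvStepOuter, hkused]
      rw [hstep, ih (k + 1) used groups (by omega) hdrop']
      have hfilt : (fun p : Int × String => !(decide (p.1 ∈ used))) (k, x) = false := by
        simp [hkused]
      rw [List.filter_cons]
      simp [hfilt]
    · -- k becomes a leader
      have hslice : PySem.List.slice facts (some (k + 1)) none = l' := by
        rw [PySem.List.slice_from facts (by omega : (0:Int) ≤ k + 1)]
        exact hdrop'
      have hadd : PySem.Set.add used k = used ++ [k] := PySem.Set.add_of_not_mem hkused
      have hnd : ((PySem.List.enumerate l' (k + 1)).map Prod.fst).Nodup :=
        pv_nodup_fst_enumerate l' (k + 1)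
      have hEgt : ∀ p ∈ PySem.List.enumerate l' (k + 1), k + 1 ≤ p.1 := by
        intro p hp
        obtain ⟨j, hj, rfl⟩ := (PySem.List.mem_enumerate_iff l' (k + 1) p).mp hp
        simp
      -- the inner loop collects exactly the pvP-filtered suffix
      have hinner :
          (PySem.List.enumerate l' (k + 1)).foldl (pvStepInner (pvWords x)) ([x], used ++ [k])
            = ([x] ++ ((PySem.List.enumerate l' (k + 1)).filter (pvP (pvWords x) used)).map Prod.snd,
               (used ++ [k]) ++ ((PySem.List.enumerate l' (k + 1)).filter (pvP (pvWords x) used)).map Prod.fst) := by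
        rw [pv_inner_fold (pvWords x) (PySem.List.enumerate l' (k + 1)) [x] (used ++ [k]) hnd]
        have hfc : (PySem.List.enumerate l' (k + 1)).filter (pvP (pvWords x) (used ++ [k]))
            = (PySem.List.enumerate l' (k + 1)).filter (pvP (pvWords x) used) := by
          apply List.filter_congr
          intro p hp
          have hpk : p.1 ≠ k := by have := hEgt p hp; omega
          simp [pvP, List.mem_append, hpk]
        rw [hfc]
      have hstep : pvStepOuter facts (groups, used) (k, x)
          = (groups ++ [[x] ++ ((PySem.List.enumerate l' (k + 1)).filter (pvP (pvWords x) used)).map Prod.snd],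
             (used ++ [k]) ++ ((PySem.List.enumerate l' (k + 1)).filter (pvP (pvWords x) used)).map Prod.fst) := by
        simp only [pvStepOuter, if_neg (show ¬ ((k, x).1 ∈ (groups, used).2) from hkused)]
        simp only [hslice, hadd]
        rw [hinner]
        simp
      rw [hstep]
      rw [ih (k + 1) ((used ++ [k]) ++ ((PySem.List.enumerate l' (k + 1)).filter (pvP (pvWords x) used)).map Prod.fst)
            (groups ++ [[x] ++ ((PySem.List.enumerate l' (k + 1)).filter (pvP (pvWords x) used)).map Prod.snd])
            (by omega) hdrop']
      -- the still-unused part of the suffix = the low-overlap part of the pending list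
      have hkeep : (PySem.List.enumerate l' (k + 1)).filter
            (fun p => !(decide (p.1 ∈ (used ++ [k]) ++ ((PySem.List.enumerate l' (k + 1)).filter (pvP (pvWords x) used)).map Prod.fst)))
          = (PySem.List.enumerate l' (k + 1)).filter
            (fun p => decide (PySem.Set.len (PySem.Set.inter (pvWords x) (pvWords p.2)) < 2)
              && !(decide (p.1 ∈ used))) := by
        apply List.filter_congr
        intro p hp
        have hpk : p.1 ≠ k := by have := hEgt p hp; omega
        have hmemrel : p.1 ∈ ((PySem.List.enumerate l' (k + 1)).filter (pvP (pvWords x) used)).map Prod.fst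
            ↔ pvP (pvWords x) used p = true :=
          pv_mem_map_fst_filter hnd hp (pvP (pvWords x) used)
        by_cases hpu : p.1 ∈ used
        · simp [List.mem_append, hpu]
        · by_cases hov : 2 ≤ (PySem.Set.inter (pvWords x) (pvWords p.2)).length
          · have hin : p.1 ∈ ((PySem.List.enumerate l' (k + 1)).filter (pvP (pvWords x) used)).map Prod.fst :=
              hmemrel.mpr (by simp [pvP, hpu, hov])
            simp [List.mem_append, hin]
            omega
          · have hnr : p.1 ∉ ((PySem.List.enumerate l' (k + 1)).filter (pvP (pvWords x) used)).map Prod.fst := by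
              intro h
              have := hmemrel.mp h
              simp [pvP, hpu, hov] at this
            simp [List.mem_append, hpu, hpk, hnr]
            omega
      rw [hkeep, List.filter_cons]
      have hhead : (fun p : Int × String => !(decide (p.1 ∈ used))) (k, x) = true := by
        simp [hkused]
      simp only [hhead, if_true]
      rw [show ((k, x) :: (PySem.List.enumerate l' (k + 1)).filter (fun p => !(decide (p.1 ∈ used)))).map pvPair
            = (x, pvWords x) :: ((PySem.List.enumerate l' (k + 1)).filter (fun p => !(decide (p.1 ∈ used)))).map pvPair from rfl]
      rw [pvBuild_cons]
      have hrelS : ((PySem.List.enumerate l' (k + 1)).filter (pvP (pvWords x) used)).map Prod.snd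
          = ((((PySem.List.enumerate l' (k + 1)).filter (fun p => !(decide (p.1 ∈ used)))).map pvPair).filter
              (fun q => decide (2 ≤ PySem.Set.len (PySem.Set.inter (x, pvWords x).2 q.2)))).map Prod.fst := by
        rw [List.filter_map, List.filter_filter, List.map_map]
        have : (Prod.fst ∘ pvPair) = (fun p : Int × String => p.2) := by
          funext p; rfl
        rw [this]
        have hb : ∀ p ∈ PySem.List.enumerate l' (k + 1),
            (((fun q => decide (2 ≤ PySem.Set.len (PySem.Set.inter (x, pvWords x).2 q.2))) ∘ pvPair) p
              && !(decide (p.1 ∈ used))) = pvP (pvWords x) used p := by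
          intro p _
          simp only [Function.comp_apply, pvP, pvPair]
          rw [Bool.and_comm]
          rfl
        rw [List.filter_congr hb]
      have hrest : (((PySem.List.enumerate l' (k + 1)).filter
              (fun p => decide (PySem.Set.len (PySem.Set.inter (pvWords x) (pvWords p.2)) < 2)
                && !(decide (p.1 ∈ used)))).map pvPair)
          = (((PySem.List.enumerate l' (k + 1)).filter (fun p => !(decide (p.1 ∈ used)))).map pvPair).filter
              (fun q => decide (PySem.Set.len (PySem.Set.inter (x, pvWords x).2 q.2) < 2)) := by
        rw [List.filter_map, List.filter_filter]
        have hb2 : ∀ p ∈ PySem.List.enumerate l' (k + 1),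
            (((fun q => decide (PySem.Set.len (PySem.Set.inter (x, pvWords x).2 q.2) < 2)) ∘ pvPair) p
              && !(decide (p.1 ∈ used)))
            = (decide (PySem.Set.len (PySem.Set.inter (pvWords x) (pvWords p.2)) < 2)
              && !(decide (p.1 ∈ used))) := by
          intro p _
          simp only [Function.comp_apply, pvPair]
          rfl
        rw [List.filter_congr hb2]
      rw [hrest, ← hrelS]
      rw [List.append_assoc]
      rfl

-- ===== VERDICT (by name: the statement is the Claim_ definition above) =====
theorem group_related_facts_py_spec : Claim_equal_group_related_facts_py := by
  intro facts _
  unfold Spec_group_related_facts_py group_related_facts_py group_related_facts_py_alt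
  by_cases hnil : facts = []
  · simp [hnil, pvBuild]
  · rw [if_neg hnil]
    rw [show PySem.Set.empty = ([] : List Int) from rfl]
    rw [pv_outer_fold facts facts 0 [] [] le_rfl (by simp)]
    have : (PySem.List.enumerate facts 0).filter (fun p => !(decide (p.1 ∈ ([] : List Int))))
        = PySem.List.enumerate facts 0 := by
      apply List.filter_eq_self.mpr; intro p _; simp
    rw [this]
    simp
    have : (PySem.List.enumerate facts 0).map pvPair
        = facts.map (fun f => (f, pvWords f)) := by
      have h1 : (PySem.List.enumerate facts 0).map pvPair
          = ((PySem.List.enumerate facts 0).map Prod.snd).map (fun f => (f, pvWords f)) := by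
        rw [List.map_map]; rfl
      rw [h1, PySem.List.map_snd_enumerate]
    rw [this]
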